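-- pv_equiv track=rewrite | github.com/Yu-Hsuan-Lin/SC101-Projects | SC101_Projects/Boggle/boggle.py | check_dict_word
-- ===== SOURCE A (Python) =====
-- def check_dict_word(word, target_lst):
-- 	"""
-- 	Check dict word. If one character not in searching word, then not add the word to python_dict.
-- 	:param word: str, word in dictionary.txt.
-- 	:param target: str, the searching word
-- 	:return: True, all character within are in searching word.
-- 	"""
-- 	# Level one: check len
-- 	if 4 <= len(word) <= len(target_lst):
-- 		# Check all the word: contains -> contains, contais
-- 		for ch in word:
-- 			if ch not in target_lst:
-- 				return False
-- 			else:
-- 				if ch == word[len(word)-1]: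
-- 					return True
-- ===== SOURCE B (Python) =====
-- def check_dict_word(word, target_lst):
--     # Level one: check len
--     if 4 <= len(word) <= len(target_lst):
--         # a word qualifies when its character set is covered by the target letters
--         return set(word) <= set(target_lst)
-- ===== Notes on version B (the rewrite author's own statement) =====
-- stated objective: faster
-- what changed: Replaces the char-by-char loop that interleaves a per-character list membership test with a last-character early-exit by a single set-containment test set(word) <= set(target_lst), removing the inner list scan.
-- intended difference: On words whose characters up to the first occurrence of the final character all lie in target_lst but some later character does not, A's early `return True` on meeting the last character makes it answer True despite the uncovered character; B returns False, which is the intended 'all characters are in the searching word' answer. — e.g. on check_dict_word("abza", ["a", "b", "c", "d"]): A returns some true, B returns some false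
import Mathlib
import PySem

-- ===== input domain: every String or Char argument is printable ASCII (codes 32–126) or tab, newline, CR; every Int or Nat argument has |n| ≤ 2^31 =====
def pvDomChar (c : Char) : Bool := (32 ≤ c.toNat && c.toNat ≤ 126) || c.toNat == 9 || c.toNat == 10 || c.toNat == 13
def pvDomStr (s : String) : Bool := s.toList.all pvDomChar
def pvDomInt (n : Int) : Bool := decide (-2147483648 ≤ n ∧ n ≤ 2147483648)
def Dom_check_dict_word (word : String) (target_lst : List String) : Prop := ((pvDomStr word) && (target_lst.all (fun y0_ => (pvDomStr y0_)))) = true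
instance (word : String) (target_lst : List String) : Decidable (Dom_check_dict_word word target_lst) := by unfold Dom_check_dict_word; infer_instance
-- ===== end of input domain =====

-- B replaces A's interleaved scan by a set-containment test; on words where A's early
-- `return True` hides an uncovered later character, B returns the intended False (see D_ below).


-- ===== PORT A =====
-- loop of A: for ch in word: if ch not in target_lst: return False; elif ch == word[len(word)-1]: return True
def checkLoopA (cs : List Char) (lastc : Option Char) (target_lst : List String) : Option Bool :=
  match cs with
  | [] => none
  | c :: rest =>
    if ¬ target_lst.contains (String.mk [c]) then some false
    else if some c == lastc then some true
    else checkLoopA rest lastc target_lst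

def check_dict_word (word : String) (target_lst : List String) : Option Bool :=
  let cs := word.toList
  if 4 ≤ cs.length ∧ cs.length ≤ target_lst.length then
    checkLoopA cs (PySem.List.pyGet? cs ((cs.length : Int) - 1)) target_lst
  else none

-- ===== PORT B =====
-- B: set(word) <= set(target_lst)
def check_dict_word_alt (word : String) (target_lst : List String) : Option Bool :=
  let cs := word.toList
  if 4 ≤ cs.length ∧ cs.length ≤ target_lst.length then
    some (PySem.Set.issubset (PySem.Set.ofList (cs.map (fun c => String.mk [c])))
                             (PySem.Set.ofList target_lst))
  else none

-- ===== PRECONDITION & SPEC =====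
-- On words whose characters up to the first occurrence of the final character all lie in
-- target_lst while some later character does not, A's early `return True` on meeting the last
-- character yields True despite the uncovered character; B returns False, the intended
-- "all characters are in the searching word" answer.
def D_check_dict_word (word : String) (target_lst : List String) : Prop :=
  (4 ≤ word.toList.length ∧ word.toList.length ≤ target_lst.length) ∧
  ((word.toList.take (word.toList.idxOf (word.toList.getLastD ' ') + 1)).all
      (fun c => target_lst.contains (String.mk [c])) = true) ∧
  (word.toList.all (fun c => target_lst.contains (String.mk [c])) = false)
instance (word : String) (target_lst : List String) : Decidable (D_check_dict_word word target_lst) := by unfold D_check_dict_word; infer_instance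

def Spec_check_dict_word (word : String) (target_lst : List String) (out : Option Bool) : Prop := ¬ D_check_dict_word word target_lst → out = check_dict_word_alt word target_lst
instance (word : String) (target_lst : List String) (out : Option Bool) : Decidable (Spec_check_dict_word word target_lst out) := by unfold Spec_check_dict_word; infer_instance

def pvDiffWitness_check_dict_word : String × List String := ("abza", ["a", "b", "c", "d"])
def pvDiffWitnessOut_check_dict_word : (Option Bool) × (Option Bool) := (some true, some false)

-- ===== CLAIM =====
def Claim_unchanged_check_dict_word : Prop := ∀ (word : String) (target_lst : List String), Dom_check_dict_word word target_lst → Spec_check_dict_word word target_lst (check_dict_word word target_lst)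
def Claim_changed_check_dict_word : Prop := Dom_check_dict_word (pvDiffWitness_check_dict_word.1) (pvDiffWitness_check_dict_word.2) ∧ D_check_dict_word (pvDiffWitness_check_dict_word.1) (pvDiffWitness_check_dict_word.2) ∧ check_dict_word (pvDiffWitness_check_dict_word.1) (pvDiffWitness_check_dict_word.2) = pvDiffWitnessOut_check_dict_word.1 ∧ check_dict_word_alt (pvDiffWitness_check_dict_word.1) (pvDiffWitness_check_dict_word.2) = pvDiffWitnessOut_check_dict_word.2 ∧ pvDiffWitnessOut_check_dict_word.1 ≠ pvDiffWitnessOut_check_dict_word.2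
def Claim_exact_check_dict_word : Prop := ∀ (word : String) (target_lst : List String), Dom_check_dict_word word target_lst → D_check_dict_word word target_lst → check_dict_word word target_lst ≠ check_dict_word_alt word target_lst

-- ===== LEMMAS AND PROOFS =====
-- A's loop, when the last character occurs in cs, returns the membership verdict on the
-- prefix up to (and including) the first occurrence of that character.
theorem checkLoopA_eq (target_lst : List String) (lastc : Char) :
    ∀ (cs : List Char), lastc ∈ cs →
      checkLoopA cs (some lastc) target_lst =
        some ((cs.take (cs.idxOf lastc + 1)).all
          (fun c => target_lst.contains (String.mk [c]))) := by
  intro cs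
  induction cs with
  | nil => intro h; cases h
  | cons c rest ih =>
    intro hmem
    by_cases hc : target_lst.contains (String.mk [c])
    · have hc' : String.mk [c] ∈ target_lst := by simpa using hc
      by_cases hl : c = lastc
      · subst hl
        simp [checkLoopA, List.idxOf_cons_self, hc']
      · have hm : lastc ∈ rest := by
          cases hmem with
          | head => exact absurd rfl hl
          | tail _ h => exact h
        have hidx : (c :: rest).idxOf lastc = rest.idxOf lastc + 1 := by
          simp [List.idxOf_cons, hl]
        rw [hidx]
        simp [checkLoopA, hc', hl, ih hm, List.all_cons]
    · have hc' : String.mk [c] ∉ target_lst := by simpa using hc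
      have h1 : (c :: rest).take ((c :: rest).idxOf lastc + 1)
          = c :: rest.take ((c :: rest).idxOf lastc) := by
        simp [List.take_succ_cons]
      rw [h1]
      simp [checkLoopA, hc', List.all_cons]

-- B's subset test is the membership verdict on the whole word.
theorem subset_eq_all (cs : List Char) (target_lst : List String) :
    PySem.Set.issubset (PySem.Set.ofList (cs.map (fun c => String.mk [c])))
        (PySem.Set.ofList target_lst)
      = cs.all (fun c => target_lst.contains (String.mk [c])) := by
  by_cases h : ∀ c ∈ cs, String.mk [c] ∈ target_lst
  · have h1 : PySem.Set.issubset (PySem.Set.ofList (cs.map (fun c => String.mk [c])))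
        (PySem.Set.ofList target_lst) = true := by
      rw [PySem.Set.issubset_iff]
      intro x hx
      rw [PySem.Set.mem_ofList] at hx ⊢
      obtain ⟨c, hc, rfl⟩ := List.mem_map.mp hx
      exact h c hc
    rw [h1]
    symm
    simp only [List.all_eq_true]
    intro c hc
    simpa using h c hc
  · push_neg at h
    obtain ⟨c, hc, hnc⟩ := h
    have h1 : PySem.Set.issubset (PySem.Set.ofList (cs.map (fun c => String.mk [c])))
        (PySem.Set.ofList target_lst) = false := by
      rw [Bool.eq_false_iff]
      intro habs
      rw [PySem.Set.issubset_iff] at habs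
      exact hnc (by
        have := habs (String.mk [c]) (by
          rw [PySem.Set.mem_ofList]
          exact List.mem_map.mpr ⟨c, hc, rfl⟩)
        rwa [PySem.Set.mem_ofList] at this)
    rw [h1]
    symm
    simp only [Bool.eq_false_iff, ne_eq, List.all_eq_true, not_forall]
    exact ⟨c, hc, by simpa using hnc⟩

-- the last-index computation in port A is getLast?
theorem pyGet_last (cs : List Char) (h : cs ≠ []) :
    PySem.List.pyGet? cs ((cs.length : Int) - 1) = some (cs.getLastD ' ') := by
  have hcast : ((cs.length : Int) - 1) = ((cs.length - 1 : Nat) : Int) := by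
    have : 0 < cs.length := List.length_pos_of_ne_nil h
    omega
  rw [hcast, PySem.List.pyGet?_natCast]
  rw [List.getLastD_eq_getLast?, ← List.getLast?_eq_getElem?]
  cases hg : cs.getLast? with
  | none => exact absurd (List.getLast?_eq_none_iff.mp hg) h
  | some lc => rfl

theorem a_value (word : String) (target_lst : List String)
    (hlen : 4 ≤ word.toList.length ∧ word.toList.length ≤ target_lst.length) :
    check_dict_word word target_lst
      = some ((word.toList.take (word.toList.idxOf (word.toList.getLastD ' ') + 1)).all
          (fun c => target_lst.contains (String.mk [c]))) := by
  have hne : word.toList ≠ [] := by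
    intro h; rw [h] at hlen; simp at hlen
  unfold check_dict_word
  simp only
  rw [if_pos hlen, pyGet_last _ hne]
  have hmem : word.toList.getLastD ' ' ∈ word.toList := by
    rw [List.getLastD_eq_getLast?]
    cases hg : word.toList.getLast? with
    | none => exact absurd (List.getLast?_eq_none_iff.mp hg) hne
    | some lc => exact List.mem_of_getLast? hg
  exact checkLoopA_eq target_lst _ _ hmem

theorem b_value (word : String) (target_lst : List String)
    (hlen : 4 ≤ word.toList.length ∧ word.toList.length ≤ target_lst.length) :
    check_dict_word_alt word target_lst
      = some (word.toList.all (fun c => target_lst.contains (String.mk [c]))) := by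
  unfold check_dict_word_alt
  simp only
  rw [if_pos hlen, subset_eq_all]

-- ===== VERDICT =====
theorem check_dict_word_spec : Claim_unchanged_check_dict_word := by
  intro word target_lst _ hnd
  by_cases hlen : 4 ≤ word.toList.length ∧ word.toList.length ≤ target_lst.length
  · rw [a_value word target_lst hlen, b_value word target_lst hlen]
    unfold D_check_dict_word at hnd
    push_neg at hnd
    congr 1
    by_cases hall : word.toList.all (fun c => target_lst.contains (String.mk [c])) = true
    · rw [hall]
      simp only [List.all_eq_true] at hall ⊢
      exact fun c hc => hall c (List.mem_of_mem_take hc)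
    · have hfalse := Bool.eq_false_iff.mpr hall
      have := hnd hlen
      rw [hfalse]
      by_contra htake
      have htake' : (word.toList.take (word.toList.idxOf (word.toList.getLastD ' ') + 1)).all
          (fun c => target_lst.contains (String.mk [c])) = true := by
        cases hb : (word.toList.take (word.toList.idxOf (word.toList.getLastD ' ') + 1)).all
            (fun c => target_lst.contains (String.mk [c])) with
        | true => rfl
        | false => exact absurd hb htake
      exact (this htake') hfalse
  · unfold check_dict_word check_dict_word_alt
    simp only
    rw [if_neg hlen, if_neg hlen]

theorem check_dict_word_changed : Claim_changed_check_dict_word := by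
  unfold Claim_changed_check_dict_word; decide

theorem check_dict_word_tight : Claim_exact_check_dict_word := by
  intro word target_lst _ hd
  obtain ⟨hlen, htake, hall⟩ := hd
  rw [a_value word target_lst hlen, b_value word target_lst hlen, htake, hall]
  simp
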